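-- pv_equiv track=rewrite | github.com/Sayan-404/pokerEconomics | poker_metrics/outs.py | trips
-- ===== SOURCE A (Python) =====
-- def trips(hole,board):
--     hand = hole+board
--     count=0
--     for i in range(len(hand)):
--         for j in range(i+1,len(hand)):
--             if (hand[i][0] == hand[j][0]):
--                 count += 1
--
--     if count == 3:
--         return 0
--     else:
--         if count == 1:
--             if len(hand) == 5:
--                 return 2
--             else:
--                 return 2
--         else:
--             return 0
-- ===== SOURCE B (Python) =====
-- def trips(hole, board):
--     freq = {}
--     pairs = 0
--     for card in hole + board:
--         r = card[0]
--         k = freq.get(r, 0)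
--         pairs += k
--         freq[r] = k + 1
--     return 2 if pairs == 1 else 0
-- ===== Notes on version B (the rewrite author's own statement) =====
-- stated objective: faster
-- what changed: Replaces the O(n^2) nested index loop over all pairs with a single pass that maintains a rank-frequency dict and adds, for each card, the number of earlier cards of the same rank; the dead len(hand)==5 branch (both arms return 2) is dropped.
import Mathlib
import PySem

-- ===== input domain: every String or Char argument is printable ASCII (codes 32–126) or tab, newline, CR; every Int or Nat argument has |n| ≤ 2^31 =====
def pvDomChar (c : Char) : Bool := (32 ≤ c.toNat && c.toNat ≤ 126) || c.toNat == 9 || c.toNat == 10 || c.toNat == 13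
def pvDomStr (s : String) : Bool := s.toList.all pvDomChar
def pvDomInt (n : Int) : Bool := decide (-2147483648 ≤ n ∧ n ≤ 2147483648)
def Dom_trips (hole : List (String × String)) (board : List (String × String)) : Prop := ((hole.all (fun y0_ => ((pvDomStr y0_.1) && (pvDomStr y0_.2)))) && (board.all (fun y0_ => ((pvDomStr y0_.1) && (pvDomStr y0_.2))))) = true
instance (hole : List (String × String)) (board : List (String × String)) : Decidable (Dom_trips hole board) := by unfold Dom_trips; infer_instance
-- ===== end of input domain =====

-- B replaces A's O(n^2) nested index loop with a single pass over the cards that keeps a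
-- rank-frequency dict and adds, per card, the number of earlier same-rank cards (alternative decomposition).


-- ===== PORT A =====
-- literal transliteration of A: nested index loops over range(len(hand)); every accessed index is
-- in range, so hand[i] is ported with pyGetD (exact here)
def trips (hole : List (String × String)) (board : List (String × String)) : Int :=
  let hand := hole ++ board
  let n : Int := PySem.List.len hand
  let count : Int :=
    (PySem.List.pyRange 0 n 1).foldl (fun c i =>
      (PySem.List.pyRange (i + 1) n 1).foldl (fun c j =>
        if (PySem.List.pyGetD hand i ("", "")).1 = (PySem.List.pyGetD hand j ("", "")).1
        then c + 1 else c) c) 0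
  if count = 3 then 0
  else if count = 1 then (if PySem.List.len hand = 5 then 2 else 2)
  else 0

-- ===== PORT B =====
def trips_alt (hole : List (String × String)) (board : List (String × String)) : Int :=
  let st := (hole ++ board).foldl
    (fun (st : PySem.Dict String Int × Int) card =>
      let k := st.1.getD card.1 0
      (st.1.insert card.1 (k + 1), st.2 + k))
    (PySem.Dict.empty, 0)
  if st.2 = 1 then 2 else 0

-- ===== PRECONDITION & SPEC =====
def Spec_trips (hole : List (String × String)) (board : List (String × String)) (out : Int) : Prop := out = trips_alt hole board
instance (hole : List (String × String)) (board : List (String × String)) (out : Int) : Decidable (Spec_trips hole board out) := by unfold Spec_trips; infer_instance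

-- ===== CLAIM (what is proved, stated in full; the proofs are below) =====
def Claim_equal_trips : Prop := ∀ (hole : List (String × String)) (board : List (String × String)), Dom_trips hole board → Spec_trips hole board (trips hole board)

-- ===== LEMMAS AND PROOFS =====

-- number of unordered same-rank pairs: head against the rest, then recurse
def pairCount : List (String × String) → Int
  | [] => 0
  | x :: xs => (xs.countP (fun y => x.1 == y.1) : Int) + pairCount xs

-- A side, combinatorial core: the per-index match counts sum to pairCount
theorem sumA_eq (hand : List (String × String)) :
    ((PySem.List.pyRange 0 (PySem.List.len hand) 1).map (fun i =>
      ((hand.drop (i + 1).toNat).countP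
        (fun y => (PySem.List.pyGetD hand i ("", "")).1 == y.1) : Int))).sum
    = pairCount hand := by
  induction hand with
  | nil => simp [PySem.List.pyRange_one_eq_nil, pairCount]
  | cons x xs ih =>
    have hlen : PySem.List.len (x :: xs) = (xs.length : Int) + 1 := by
      simp [PySem.List.len]
    rw [hlen, PySem.List.pyRange_one_cons (by positivity)]
    simp only [zero_add]
    have htail : PySem.List.pyRange 1 ((xs.length : Int) + 1) 1
        = (PySem.List.pyRange 0 (PySem.List.len xs) 1).map (fun i => i + 1) := by
      simp [PySem.List.pyRange_one, PySem.List.len]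
      omega
    rw [htail]
    simp only [List.map_cons, List.map_map, List.sum_cons, Function.comp_def]
    have hterm : ∀ i ∈ PySem.List.pyRange 0 (PySem.List.len xs) 1,
        (((x :: xs).drop ((i + 1) + 1).toNat).countP
          (fun y => (PySem.List.pyGetD (x :: xs) (i + 1) ("", "")).1 == y.1) : Int)
        = ((xs.drop (i + 1).toNat).countP
          (fun y => (PySem.List.pyGetD xs i ("", "")).1 == y.1) : Int) := by
      intro i hi
      have h0 : 0 ≤ i := (PySem.List.mem_pyRange_one.mp hi).1
      obtain ⟨k, rfl⟩ := Int.eq_ofNat_of_zero_le h0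
      have e1 : ((k : Int) + 1 + 1).toNat = k + 2 := by omega
      have e2 : ((k : Int) + 1).toNat = k + 1 := by omega
      have e3 : PySem.List.pyGetD (x :: xs) ((k : Int) + 1) ("", "")
          = PySem.List.pyGetD xs (k : Int) ("", "") := by
        have : ((k : Int) + 1) = ((k + 1 : Nat) : Int) := by push_cast; ring
        rw [this, PySem.List.pyGetD_natCast, PySem.List.pyGetD_natCast]
        simp
      rw [e1, e2, e3]
      simp
    rw [List.map_congr_left hterm, ih]
    have hhead : PySem.List.pyGetD (x :: xs) 0 ("", "") = x := by
      simp [PySem.List.pyGetD]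
    simp only [pairCount]
    rw [show ((0 : Int) + 1).toNat = 1 by omega, hhead]
    simp

-- B side: the dict one-pass fold, generalized over the running state
theorem loopB_gen (l : List (String × String)) :
    ∀ (d : PySem.Dict String Int) (c : Int),
    ((l.foldl (fun (st : PySem.Dict String Int × Int) card =>
      let k := st.1.getD card.1 0
      (st.1.insert card.1 (k + 1), st.2 + k)) (d, c)).2)
    = c + (l.map (fun y => d.getD y.1 0)).sum + pairCount l := by
  induction l with
  | nil => intro d c; simp [pairCount]
  | cons x xs ih =>
    intro d c
    simp only [List.foldl_cons]
    rw [ih]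
    have hmap : xs.map (fun y => (d.insert x.1 (d.getD x.1 0 + 1)).getD y.1 0)
        = xs.map (fun y => d.getD y.1 0 + (if x.1 == y.1 then 1 else 0)) := by
      apply List.map_congr_left
      intro y _
      rw [PySem.Dict.getD_insert]
      by_cases h : y.1 = x.1
      · simp [h]
      · have h' : ¬ (x.1 = y.1) := fun e => h e.symm
        simp [h, h']
    rw [hmap, PySem.List.sum_map_add_int, PySem.List.sum_map_ite_one_zero]
    simp only [pairCount, List.map_cons, List.sum_cons]
    ring

-- ===== VERDICT (by name: the statement is the Claim_ definition above) =====
theorem trips_spec : Claim_equal_trips := by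
  intro hole board _
  unfold Spec_trips trips trips_alt
  have hA : (PySem.List.pyRange 0 (PySem.List.len (hole ++ board)) 1).foldl (fun c i =>
      (PySem.List.pyRange (i + 1) (PySem.List.len (hole ++ board)) 1).foldl (fun c j =>
        if (PySem.List.pyGetD (hole ++ board) i ("", "")).1
           = (PySem.List.pyGetD (hole ++ board) j ("", "")).1
        then c + 1 else c) c) 0 = pairCount (hole ++ board) := by
    have hinner : ∀ (c : Int), ∀ i ∈ PySem.List.pyRange 0 (PySem.List.len (hole ++ board)) 1,
        (PySem.List.pyRange (i + 1) (PySem.List.len (hole ++ board)) 1).foldl (fun c j =>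
          if (PySem.List.pyGetD (hole ++ board) i ("", "")).1
             = (PySem.List.pyGetD (hole ++ board) j ("", "")).1
          then c + 1 else c) c
        = c + (((hole ++ board).drop (i + 1).toNat).countP
            (fun y => (PySem.List.pyGetD (hole ++ board) i ("", "")).1 == y.1) : Int) := by
      intro c i hi
      have h0 : (0 : Int) ≤ i + 1 := by
        have := (PySem.List.mem_pyRange_one.mp hi).1; omega
      rw [PySem.List.foldl_pyRange_pyGetD (hole ++ board) ("", "")
        (fun (c : Int) (y : String × String) =>
          if (PySem.List.pyGetD (hole ++ board) i ("", "")).1 = y.1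
          then c + 1 else c) c h0]
      have hc := PySem.List.foldl_count_if
        (fun (y : String × String) => (PySem.List.pyGetD (hole ++ board) i ("", "")).1 == y.1)
        ((hole ++ board).drop (i + 1).toNat) c
      simpa using hc
    calc (PySem.List.pyRange 0 (PySem.List.len (hole ++ board)) 1).foldl (fun c i =>
          (PySem.List.pyRange (i + 1) (PySem.List.len (hole ++ board)) 1).foldl (fun c j =>
            if (PySem.List.pyGetD (hole ++ board) i ("", "")).1
               = (PySem.List.pyGetD (hole ++ board) j ("", "")).1
            then c + 1 else c) c) 0
        = (PySem.List.pyRange 0 (PySem.List.len (hole ++ board)) 1).foldl (fun c i =>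
            c + (((hole ++ board).drop (i + 1).toNat).countP
              (fun y => (PySem.List.pyGetD (hole ++ board) i ("", "")).1 == y.1) : Int)) 0 := by
          apply PySem.List.foldl_congr_mem
          intro c i hi
          exact hinner c i hi
      _ = pairCount (hole ++ board) := by
          rw [PySem.List.foldl_add]
          rw [sumA_eq (hole ++ board)]
          ring
  have hB := loopB_gen (hole ++ board) PySem.Dict.empty 0
  simp only [hA]
  rw [hB]
  simp only [PySem.Dict.getD_empty, List.map_const', List.sum_replicate, smul_zero]
  rcases eq_or_ne (pairCount (hole ++ board)) 3 with h3 | h3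
  · simp [h3]
  · rcases eq_or_ne (pairCount (hole ++ board)) 1 with h1 | h1 <;> simp [h3, h1]
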